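-- pv_equiv track=rewrite | github.com/skndi/ai-study | fifteen_puzzle/algorithms/first_choice_hc.py | position
-- ===== SOURCE A (Python) =====
-- def position(number):
--     first_coord = 0;
--     second_coord = 0;
--     while number > 4:
--         number -= 4;
--         first_coord += 1;
--
--     while number > 1:
--         number -= 1;
--         second_coord += 1;
--
--     return (first_coord, second_coord);
-- ===== SOURCE B (Python) =====
-- def position(number):
--     if number < 1:
--         return (0, 0)
--     return divmod(number - 1, 4)
-- ===== Notes on version B (the rewrite author's own statement) =====
-- stated objective: faster
-- what changed: Replaces both subtraction loops with a single closed-form divmod(number-1, 4), with (0,0) for number < 1.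
import Mathlib
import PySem

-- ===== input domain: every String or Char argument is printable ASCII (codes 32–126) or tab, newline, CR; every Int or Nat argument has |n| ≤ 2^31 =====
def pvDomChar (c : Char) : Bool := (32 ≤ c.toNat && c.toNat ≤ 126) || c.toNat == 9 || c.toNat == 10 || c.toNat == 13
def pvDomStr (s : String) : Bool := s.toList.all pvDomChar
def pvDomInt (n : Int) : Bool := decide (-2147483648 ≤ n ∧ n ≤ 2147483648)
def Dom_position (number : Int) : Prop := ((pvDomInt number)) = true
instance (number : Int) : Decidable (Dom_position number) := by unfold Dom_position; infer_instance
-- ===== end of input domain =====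

-- ===== PORT A =====
-- B replaces both subtraction loops with one closed-form divmod (objective: faster).
-- Loop 'while number > 4: number -= 4; first_coord += 1'
def posLoop1 (number first : Int) : Int × Int :=
  if number > 4 then posLoop1 (number - 4) (first + 1) else (number, first)
termination_by number.toNat
decreasing_by omega

-- Loop 'while number > 1: number -= 1; second_coord += 1'
def posLoop2 (number second : Int) : Int × Int :=
  if number > 1 then posLoop2 (number - 1) (second + 1) else (number, second)
termination_by number.toNat
decreasing_by omega

def position (number : Int) : List Int :=
  let r1 := posLoop1 number 0
  let r2 := posLoop2 r1.1 0
  [r1.2, r2.2]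

-- ===== PORT B =====
def position_alt (number : Int) : List Int :=
  if number < 1 then [0, 0]
  else [PySem.Int.floordiv (number - 1) 4, PySem.Int.mod (number - 1) 4]

-- ===== PRECONDITION & SPEC =====
def Spec_position (number : Int) (out : List Int) : Prop := out = position_alt number
instance (number : Int) (out : List Int) : Decidable (Spec_position number out) := by unfold Spec_position; infer_instance

-- ===== CLAIM (what is proved, stated in full; the proofs are below) =====
def Claim_equal_position : Prop := ∀ (number : Int), Dom_position number → Spec_position number (position number)

-- ===== LEMMAS AND PROOFS =====
theorem posLoop1_eq (m : Nat) : ∀ (f : Int), posLoop1 ((m : Int) + 1) f = ((m : Int) % 4 + 1, f + (m : Int) / 4) := by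
  induction m using Nat.strong_induction_on with
  | _ m ih =>
    intro f
    rw [posLoop1]
    by_cases h : (m : Int) + 1 > 4
    · have hm : 4 ≤ m := by omega
      simp only [if_pos h]
      have : ((m : Int) + 1) - 4 = ((m - 4 : Nat) : Int) + 1 := by push_cast [hm]; ring
      rw [this, ih (m - 4) (by omega)]
      have h4 : ((m - 4 : Nat) : Int) = (m : Int) - 4 := by push_cast [hm]; ring
      rw [h4, Prod.ext_iff]
      constructor <;> simp <;> omega
    · simp only [if_neg h]
      have : (m : Int) % 4 = m ∧ (m : Int) / 4 = 0 := by omega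
      rw [this.1, this.2]; simp

theorem posLoop2_eq (m : Nat) : ∀ (s : Int), posLoop2 ((m : Int) + 1) s = (1, s + (m : Int)) := by
  induction m with
  | zero => intro s; rw [posLoop2]; norm_num
  | succ k ih =>
    intro s
    rw [posLoop2]
    have h : ((k : Int) + 1 + 1 : Int) > 1 := by omega
    push_cast
    rw [if_pos (by omega : (k : Int) + 1 + 1 > 1)]
    have : (k : Int) + 1 + 1 - 1 = (k : Int) + 1 := by ring
    rw [this, ih, Prod.ext_iff]
    constructor <;> simp <;> ring

theorem posLoop1_low (n f : Int) (h : n ≤ 4) : posLoop1 n f = (n, f) := by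
  rw [posLoop1]; simp [show ¬ n > 4 by omega]

theorem posLoop2_low (n s : Int) (h : n ≤ 1) : posLoop2 n s = (n, s) := by
  rw [posLoop2]; simp [show ¬ n > 1 by omega]

-- ===== VERDICT (by name: the statement is the Claim_ definition above) =====
theorem position_spec : Claim_equal_position := by
  intro number _
  unfold Spec_position position position_alt
  by_cases h : number < 1
  · rw [posLoop1_low number 0 (by omega)]
    simp only
    rw [posLoop2_low number 0 (by omega)]
    simp [h]
  · have h1 : 1 ≤ number := by omega
    set m : Nat := (number - 1).toNat with hm
    have hn : number = (m : Int) + 1 := by omega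
    rw [hn, posLoop1_eq m 0]
    simp only
    have hmod : (m : Int) % 4 + 1 = (((m : Int) % 4).toNat : Int) + 1 := by
      have : 0 ≤ (m : Int) % 4 := by omega
      omega
    have : posLoop2 ((m : Int) % 4 + 1) 0 = (1, 0 + (m : Int) % 4) := by
      rw [hmod]
      have := posLoop2_eq ((m : Int) % 4).toNat 0
      rw [this, Prod.mk.injEq]
      exact ⟨rfl, by omega⟩
    rw [this]
    rw [if_neg (by omega : ¬ ((m : Int) + 1 < 1))]
    simp only [PySem.Int.floordiv, PySem.Int.mod]
    have h2 : (m : Int) + 1 - 1 = (m : Int) := by ring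
    rw [h2]
    simp only [List.cons.injEq]
    refine ⟨by rw [Int.fdiv_eq_ediv_of_nonneg _ (by norm_num)]; omega,
            by rw [Int.fmod_eq_emod_of_nonneg _ (by norm_num)]; omega, trivial⟩
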